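-- pv_equiv track=rewrite | github.com/timointhebush/AlgorithmStudy | programmers/커뮤러닝7기/중간고사_2.py | solution
-- ===== SOURCE A (Python) =====
-- from collections import deque
--
-- def solution(people, tshirts):
--     reversed_people_q = deque(sorted(people, reverse=True))
--     reversed_tshirts_q = deque(sorted(tshirts, reverse=True))
--     answer = 0
--     while reversed_people_q and reversed_tshirts_q:
--         people_size = reversed_people_q.popleft()
--         if people_size > reversed_tshirts_q[0]:
--             continue
--         reversed_tshirts_q.popleft()
--         answer += 1
--     return answer
-- ===== SOURCE B (Python) =====
-- def solution(people, tshirts):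
--     p = sorted(people)
--     t = sorted(tshirts)
--     i = 0
--     j = 0
--     answer = 0
--     while i < len(p) and j < len(t):
--         if p[i] <= t[j]:
--             answer += 1
--             i += 1
--             j += 1
--         else:
--             j += 1
--     return answer
-- ===== Notes on version B (the rewrite author's own statement) =====
-- stated objective: alternative
-- what changed: Replaces the descending deque greedy that discards too-large people with an ascending two-pointer sweep over plain sorted lists that discards too-small tshirts; the dual greedy matches each person to its smallest fitting tshirt.
import Mathlib
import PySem

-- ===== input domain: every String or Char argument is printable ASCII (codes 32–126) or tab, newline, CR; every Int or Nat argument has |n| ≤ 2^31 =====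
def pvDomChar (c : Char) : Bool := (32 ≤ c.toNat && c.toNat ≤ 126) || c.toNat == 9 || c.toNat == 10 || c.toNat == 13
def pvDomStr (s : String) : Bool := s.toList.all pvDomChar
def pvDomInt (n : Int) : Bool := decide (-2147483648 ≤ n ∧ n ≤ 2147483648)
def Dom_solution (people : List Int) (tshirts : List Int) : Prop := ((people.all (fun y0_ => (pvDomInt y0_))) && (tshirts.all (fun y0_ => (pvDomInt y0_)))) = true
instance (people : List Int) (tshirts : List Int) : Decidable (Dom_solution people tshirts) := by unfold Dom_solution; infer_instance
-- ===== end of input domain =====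

-- B replaces A's descending deque greedy (discard too-large people) with an ascending
-- two-pointer sweep over sorted lists (discard too-small tshirts); same cost, dual strategy.

-- ===== PORT A =====
-- while loop of A: pop the largest remaining person; if it exceeds the largest remaining
-- tshirt, discard the person ("continue"); otherwise consume the tshirt and count.
def solutionLoopA : List Int → List Int → Int → Int
  | [], _, answer => answer
  | _ :: _, [], answer => answer
  | p :: ps, t :: ts, answer =>
    if p > t then solutionLoopA ps (t :: ts) answer
    else solutionLoopA ps ts (answer + 1)
  termination_by ps _ _ => ps.length

def solution (people : List Int) (tshirts : List Int) : Int :=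
  solutionLoopA (PySem.List.sorted people (fun x => x) true)
    (PySem.List.sorted tshirts (fun x => x) true) 0

-- ===== PORT B =====
-- while loop of B: two index pointers over the ascending sorted lists; a fitting tshirt
-- matches (advance both), a too-small tshirt is skipped (advance j only).
def solutionLoopB (p t : List Int) (i j : Nat) (answer : Int) : Int :=
  if hi : i < p.length then
    if hj : j < t.length then
      if p[i] ≤ t[j] then solutionLoopB p t (i + 1) (j + 1) (answer + 1)
      else solutionLoopB p t i (j + 1) answer
    else answer
  else answer
  termination_by t.length - j

def solution_alt (people : List Int) (tshirts : List Int) : Int :=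
  solutionLoopB (PySem.List.sorted people (fun x => x) false)
    (PySem.List.sorted tshirts (fun x => x) false) 0 0 0

-- ===== PRECONDITION & SPEC =====
def Spec_solution (people : List Int) (tshirts : List Int) (out : Int) : Prop := out = solution_alt people tshirts
instance (people : List Int) (tshirts : List Int) (out : Int) : Decidable (Spec_solution people tshirts out) := by unfold Spec_solution; infer_instance

-- ===== CLAIM (what is proved, stated in full; the proofs are below) =====
def Claim_equal_solution : Prop := ∀ (people : List Int) (tshirts : List Int), Dom_solution people tshirts → Spec_solution people tshirts (solution people tshirts)

-- ===== LEMMAS AND PROOFS =====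

-- A's greedy without accumulator (people descending, tshirts descending).
def fCnt : List Int → List Int → Int
  | _, [] => 0
  | [], _ :: _ => 0
  | p :: ps, t :: ts => if p > t then fCnt ps (t :: ts) else 1 + fCnt ps ts
  termination_by ps _ => ps.length

-- B's greedy without pointers (people ascending, tshirts ascending).
def gCnt : List Int → List Int → Int
  | _, [] => 0
  | [], _ :: _ => 0
  | p :: ps, t :: ts => if p ≤ t then 1 + gCnt ps ts else gCnt (p :: ps) ts
  termination_by _ ts => ts.length

-- Full run state of B's greedy: (count, leftover people, leftover tshirts).
def run : List Int → List Int → Int × List Int × List Int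
  | [], t => (0, [], t)
  | p :: ps, [] => (0, p :: ps, [])
  | p :: ps, t :: ts =>
    if p ≤ t then
      let r := run ps ts
      (r.1 + 1, r.2.1, r.2.2)
    else run (p :: ps) ts
  termination_by _ ts => ts.length

theorem gCnt_run (P T : List Int) : gCnt P T = (run P T).1 := by
  induction P, T using gCnt.induct with
  | case1 P => cases P <;> simp [gCnt, run]
  | case2 p ps => simp [gCnt, run]
  | case3 p ps t ts h ih => simp [gCnt, run, h, ih]; ring
  | case4 p ps t ts h ih => simp [gCnt, run, h, ih]

theorem run_inv (P T : List Int) : (run P T).2.1 ≠ [] → (run P T).2.2 = [] := by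
  induction P, T using run.induct with
  | case1 t => simp [run]
  | case2 p ps => simp [run]
  | case3 p ps t ts h ih => simpa [run, h] using ih
  | case4 p ps t ts h ih => simpa [run, h] using ih

theorem run_people_mem (P T : List Int) : ∀ x ∈ (run P T).2.1, x ∈ P := by
  induction P, T using run.induct with
  | case1 t => simp [run]
  | case2 p ps => simp [run]
  | case3 p ps t ts h ih =>
    intro x hx; simp only [run, if_pos h] at hx
    exact List.mem_cons_of_mem _ (ih x hx)
  | case4 p ps t ts h ih =>
    intro x hx; simp only [run, if_neg h] at hx
    exact ih x hx

theorem run_tshirts_mem (P T : List Int) : ∀ x ∈ (run P T).2.2, x ∈ T := by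
  induction P, T using run.induct with
  | case1 t => simp [run]
  | case2 p ps => simp [run]
  | case3 p ps t ts h ih =>
    intro x hx; simp only [run, if_pos h] at hx
    exact List.mem_cons_of_mem _ (ih x hx)
  | case4 p ps t ts h ih =>
    intro x hx; simp only [run, if_neg h] at hx
    exact List.mem_cons_of_mem _ (ih x hx)

-- Decompose a run over an appended people list.
theorem run_people_append (P Q T : List Int) :
    run (P ++ Q) T =
      ((run P T).1 + (run ((run P T).2.1 ++ Q) (run P T).2.2).1,
       (run ((run P T).2.1 ++ Q) (run P T).2.2).2) := by
  induction P, T using run.induct with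
  | case1 t => simp [run]
  | case2 p ps => simp [run]
  | case3 p ps t ts h ih =>
    simp only [List.cons_append, run, if_pos h, ih, Prod.mk.injEq]
    exact ⟨by ring, trivial⟩
  | case4 p ps t ts h ih =>
    simp only [List.cons_append, run, if_neg h]
    exact ih

-- Decompose a run over an appended tshirt list.
theorem run_tshirts_append (P T S : List Int) :
    run P (T ++ S) =
      ((run P T).1 + (run (run P T).2.1 ((run P T).2.2 ++ S)).1,
       (run (run P T).2.1 ((run P T).2.2 ++ S)).2) := by
  induction P, T using run.induct with
  | case1 t =>
    cases t <;> simp [run]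
  | case2 p ps => simp [run]
  | case3 p ps t ts h ih =>
    simp only [List.cons_append, run, if_pos h, ih, Prod.mk.injEq]
    exact ⟨by ring, trivial⟩
  | case4 p ps t ts h ih =>
    simp only [List.cons_append, run, if_neg h]
    exact ih

-- A single person larger than every tshirt matches nothing.
theorem run_single_none (p : Int) (L : List Int) (h : ∀ x ∈ L, x < p) :
    (run [p] L).1 = 0 := by
  induction L with
  | nil => simp [run]
  | cons t ts ih =>
    have ht : t < p := h t (List.mem_cons_self)
    simp only [run, if_neg (by omega : ¬ p ≤ t)]
    exact ih fun x hx => h x (List.mem_cons_of_mem _ hx)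

-- A single person with some fitting tshirt matches exactly one.
theorem run_single_one (p : Int) (L : List Int) (h : ∃ x ∈ L, p ≤ x) :
    (run [p] L).1 = 1 := by
  induction L with
  | nil => simp at h
  | cons t ts ih =>
    by_cases hpt : p ≤ t
    · simp [run, hpt]
    · simp only [run, if_neg hpt]
      apply ih
      rcases h with ⟨x, hx, hpx⟩
      rcases List.mem_cons.mp hx with rfl | hx'
      · exact absurd hpx hpt
      · exact ⟨x, hx', hpx⟩

-- Appending a person larger than every tshirt does not change B's count.
theorem gCnt_snoc_person (P T : List Int) (p : Int) (h : ∀ x ∈ T, x < p) :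
    gCnt (P ++ [p]) T = gCnt P T := by
  rw [gCnt_run, gCnt_run, run_people_append]
  rcases heq : (run P T).2.1 with _ | ⟨q, qs⟩
  · have : (run [p] (run P T).2.2).1 = 0 :=
      run_single_none p _ (fun x hx => h x (run_tshirts_mem P T x hx))
    simp [this]
  · have hT : (run P T).2.2 = [] := run_inv P T (by simp [heq])
    rw [hT]
    rcases (q :: qs) ++ [p] with _ | ⟨r, rs⟩ <;> simp [run]

-- Appending a maximal person and a tshirt it fits adds exactly one match.
theorem gCnt_snoc_both (P T : List Int) (p t : Int) (hpt : p ≤ t)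
    (hP : ∀ x ∈ P, x ≤ t) :
    gCnt (P ++ [p]) (T ++ [t]) = gCnt P T + 1 := by
  rw [gCnt_run, gCnt_run, run_people_append, run_tshirts_append]
  rcases heq : (run P T).2.2 with _ | ⟨u, us⟩
  · -- tshirts exhausted in the base run; leftover people face [t]
    rcases hpeq : (run P T).2.1 with _ | ⟨q, qs⟩
    · -- no leftover people either
      simp only [List.nil_append, run]
      simp [hpt]
    · -- leftover person q ≤ t matches t
      have hq : q ≤ t := hP q (run_people_mem P T q (by simp [hpeq]))
      simp only [List.nil_append, run, if_pos hq]
      rcases qs with _ | ⟨r, rs⟩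
      · simp [run]
      · rcases (r :: rs) ++ [p] with _ | _ <;> simp [run]
  · -- leftover tshirts: base people all placed, single p faces leftover ++ [t]
    have hPr : (run P T).2.1 = [] := by
      by_contra hne
      have := run_inv P T hne
      simp [heq] at this
    rw [hPr]
    simp only [List.nil_append, run]
    have h1 : (run [p] (u :: (us ++ [t]))).1 = 1 :=
      run_single_one p _ ⟨t, by simp, hpt⟩
    simp only [List.cons_append] at h1 ⊢
    omega

-- The duality: A's descending discard-people greedy equals B's ascending
-- discard-tshirts greedy, for a descending people list and ascending tshirt list.
theorem main_duality (Q : List Int) : ∀ (T : List Int),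
    Q.Pairwise (fun a b => b ≤ a) → T.Pairwise (fun a b => a ≤ b) →
    fCnt Q T.reverse = gCnt Q.reverse T := by
  induction Q with
  | nil =>
    intro T _ _
    simp only [List.reverse_nil]
    rw [show gCnt [] T = 0 from by cases T <;> simp [gCnt]]
    cases hT : T.reverse <;> simp [fCnt]
  | cons p Q' ih =>
    intro T hQ hT
    have hQ' : Q'.Pairwise (fun a b => b ≤ a) := hQ.of_cons
    have hQp : ∀ x ∈ Q', x ≤ p := fun x hx => List.rel_of_pairwise_cons hQ hx
    rcases List.eq_nil_or_concat T with rfl | ⟨T', t, rfl⟩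
    · simp only [List.reverse_nil]
      cases h : (p :: Q').reverse <;> simp [fCnt, gCnt]
    · simp only [List.concat_eq_append] at hT ⊢
      have hT' : T'.Pairwise (fun a b => a ≤ b) :=
        (List.pairwise_append.mp hT).1
      have hTt : ∀ x ∈ T', x ≤ t := fun x hx =>
        (List.pairwise_append.mp hT).2.2 x hx t (by simp)
      rw [List.reverse_append, List.reverse_singleton, List.singleton_append]
      by_cases hpt : p > t
      · -- A discards the person p; B never matches p either
        rw [show fCnt (p :: Q') (t :: T'.reverse) = fCnt Q' (t :: T'.reverse) by
              simp [fCnt, hpt]]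
        have : fCnt Q' (T' ++ [t]).reverse = gCnt Q'.reverse (T' ++ [t]) :=
          ih (T' ++ [t]) hQ' hT
        rw [List.reverse_append, List.reverse_singleton, List.singleton_append] at this
        rw [this, List.reverse_cons, gCnt_snoc_person]
        intro x hx
        rcases List.mem_append.mp hx with hx' | hx'
        · exact lt_of_le_of_lt (hTt x hx') hpt
        · simp at hx'; omega
      · -- A matches p with t; so does B (as the largest pair)
        have hple : p ≤ t := by omega
        rw [show fCnt (p :: Q') (t :: T'.reverse) = 1 + fCnt Q' T'.reverse by
              simp [fCnt, hpt]]
        rw [ih T' hQ' hT', List.reverse_cons, gCnt_snoc_both _ _ _ _ hple]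
        · ring
        · intro x hx
          rw [List.mem_reverse] at hx
          exact le_trans (hQp x hx) hple

-- Bridge: A's loop accumulates fCnt.
theorem solutionLoopA_eq (P T : List Int) (acc : Int) :
    solutionLoopA P T acc = acc + fCnt P T := by
  induction P, T, acc using solutionLoopA.induct with
  | case1 T acc => cases T <;> simp [solutionLoopA, fCnt]
  | case2 p ps acc => simp [solutionLoopA, fCnt]
  | case3 p ps t ts acc h ih => simp [solutionLoopA, fCnt, h, ih]
  | case4 p ps t ts acc h ih => simp [solutionLoopA, fCnt, h, ih]; ring

-- Bridge: B's pointer loop computes gCnt of the dropped suffixes.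
theorem solutionLoopB_eq (p t : List Int) (i j : Nat) (acc : Int) :
    solutionLoopB p t i j acc = acc + gCnt (p.drop i) (t.drop j) := by
  induction i, j, acc using solutionLoopB.induct p t with
  | case1 i j acc hi hj hle ih =>
    rw [solutionLoopB]
    simp only [dif_pos hi, dif_pos hj, ih,
      List.drop_eq_getElem_cons hi, List.drop_eq_getElem_cons hj, gCnt, if_pos hle]
    ring
  | case2 i j acc hi hj hle ih =>
    rw [solutionLoopB]
    simp only [dif_pos hi, dif_pos hj, ih,
      List.drop_eq_getElem_cons hi, List.drop_eq_getElem_cons hj, gCnt, if_neg hle]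
  | case3 i j acc hi hj =>
    rw [solutionLoopB]
    have : t.drop j = [] := List.drop_eq_nil_of_le (by omega)
    simp [dif_pos hi, dif_neg hj, this, gCnt]
  | case4 i j acc hi =>
    rw [solutionLoopB]
    have hp : p.drop i = [] := List.drop_eq_nil_of_le (by omega)
    rcases ht : t.drop j with _ | ⟨x, xs⟩ <;> simp [dif_neg hi, hp, gCnt]

-- Python's sorted(xs, reverse=True) on Ints is the reverse of sorted(xs).
theorem sorted_true_eq_reverse (xs : List Int) :
    PySem.List.sorted xs (fun x => x) true = (PySem.List.sorted xs (fun x => x) false).reverse := by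
  apply List.Perm.eq_of_pairwise (le := fun a b : Int => b ≤ a)
  · intro a b _ _ h1 h2; omega
  · simpa using PySem.List.sorted_pairwise_rev xs (fun x => x)
  · exact List.pairwise_reverse.mpr (by
      simpa using PySem.List.sorted_pairwise xs (fun x => x))
  · exact (PySem.List.sorted_perm xs (fun x => x) true).trans
      ((PySem.List.sorted_perm xs (fun x => x) false).symm.trans
        (List.reverse_perm _).symm)

-- ===== VERDICT (by name: the statement is the Claim_ definition above) =====
theorem solution_spec : Claim_equal_solution := by
  intro people tshirts _
  unfold Spec_solution solution solution_alt
  rw [solutionLoopA_eq, solutionLoopB_eq]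
  simp only [List.drop_zero, zero_add]
  rw [sorted_true_eq_reverse, sorted_true_eq_reverse]
  have := main_duality (PySem.List.sorted people (fun x => x) false).reverse
    (PySem.List.sorted tshirts (fun x => x) false)
    (List.pairwise_reverse.mpr (by
      simpa using PySem.List.sorted_pairwise people (fun x => x)))
    (by simpa using PySem.List.sorted_pairwise tshirts (fun x => x))
  rw [this, List.reverse_reverse]
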